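-- pv_equiv track=rewrite | github.com/dssg/machine_learning_legislation | src/python/classification/feature_generators/calais_feature_generator.py | calais_feature_dict
-- ===== SOURCE A (Python) =====
-- def calais_feature_dict(extracted_entities):
--     """
--     Input: list of extracted entities
--     Ouput: dictionary of calais entities, count values
--     """
--     unique_entities = set(extracted_entities)
--     feature_dict = dict()
--     for item in extracted_entities:
--         if item not in feature_dict:
--             feature_dict[item]=1
--         else:
--             feature_dict[item]=feature_dict[item]+1
--     return feature_dict
-- ===== SOURCE B (Python) =====
-- def calais_feature_dict(extracted_entities):
--     """
--     Input: list of extracted entities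
--     Ouput: dictionary of calais entities, count values
--     """
--     feature_dict = dict()
--     for item in dict.fromkeys(extracted_entities):
--         feature_dict[item] = extracted_entities.count(item)
--     return feature_dict
-- ===== Notes on version B (the rewrite author's own statement) =====
-- stated objective: alternative
-- what changed: Replaces the single-pass contains-then-increment accumulation with a distinct-keys pass: ordered dedup of the entities, then one list.count rescan per distinct key.
import Mathlib
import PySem

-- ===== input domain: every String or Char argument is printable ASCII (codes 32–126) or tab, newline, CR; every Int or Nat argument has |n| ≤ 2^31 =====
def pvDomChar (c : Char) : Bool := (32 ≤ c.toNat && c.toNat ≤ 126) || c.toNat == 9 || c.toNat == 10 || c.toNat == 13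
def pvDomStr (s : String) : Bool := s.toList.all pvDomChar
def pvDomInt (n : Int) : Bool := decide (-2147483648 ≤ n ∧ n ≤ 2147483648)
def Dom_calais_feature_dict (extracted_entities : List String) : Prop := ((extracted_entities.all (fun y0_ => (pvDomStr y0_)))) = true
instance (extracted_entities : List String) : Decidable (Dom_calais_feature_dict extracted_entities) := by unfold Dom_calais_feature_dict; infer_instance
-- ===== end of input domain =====

-- B builds the dict from the ordered distinct entities with one list.count per key instead of
-- A's single-pass contains-then-increment accumulation (alternative decomposition, not faster).

-- ===== PORT A =====
def calais_feature_dict (extracted_entities : List String) : List (String × Int) :=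
  -- unique_entities = set(extracted_entities) is computed and unused in A; ported as a let
  let _unique_entities := PySem.Set.ofList extracted_entities
  let feature_dict : PySem.Dict String Int :=
    extracted_entities.foldl
      (fun d item =>
        if d.contains item = false then d.insert item 1
        else d.insert item (d.getD item 0 + 1))
      PySem.Dict.empty
  feature_dict.items

-- ===== PORT B =====
def calais_feature_dict_alt (extracted_entities : List String) : List (String × Int) :=
  (PySem.List.dedup extracted_entities).foldl
    (fun d item => d.insert item ((PySem.List.count extracted_entities item : Int)))
    (PySem.Dict.empty : PySem.Dict String Int) |>.items

-- ===== PRECONDITION & SPEC =====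
def Spec_calais_feature_dict (extracted_entities : List String) (out : List (String × Int)) : Prop := out = calais_feature_dict_alt extracted_entities
instance (extracted_entities : List String) (out : List (String × Int)) : Decidable (Spec_calais_feature_dict extracted_entities out) := by unfold Spec_calais_feature_dict; infer_instance

-- ===== CLAIM (what is proved, stated in full; the proofs are below) =====
def Claim_equal_calais_feature_dict : Prop := ∀ (extracted_entities : List String), Dom_calais_feature_dict extracted_entities → Spec_calais_feature_dict extracted_entities (calais_feature_dict extracted_entities)

-- ===== LEMMAS AND PROOFS =====

-- ===== VERDICT (by name: the statement is the Claim_ definition above) =====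
-- A's loop body equals Counter's step (modify item 0 (+1)).
theorem step_eq_modify (d : PySem.Dict String Int) (x : String) :
    (if d.contains x = false then d.insert x 1
     else d.insert x (d.getD x 0 + 1)) = d.modify x 0 (· + 1) := by
  by_cases h : d.contains x = false
  · simp [h, PySem.Dict.modify, PySem.Dict.getD_of_not_contains d _ h]
  · simp [h, PySem.Dict.modify]

theorem calais_feature_dict_spec : Claim_equal_calais_feature_dict := by
  intro xs _
  unfold Spec_calais_feature_dict calais_feature_dict calais_feature_dict_alt
  have hA : (xs.foldl
      (fun d item =>
        if d.contains item = false then d.insert item 1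
        else d.insert item (d.getD item 0 + 1))
      PySem.Dict.empty) = PySem.Dict.counter xs := by
    rw [PySem.Dict.counter_eq_foldl]
    congr 1
    funext d x
    exact step_eq_modify d x
  have hB : (List.foldl (fun d item => d.insert item ((PySem.List.count xs item : Int)))
      (PySem.Dict.empty : PySem.Dict String Int) (PySem.List.dedup xs)).items
      = (PySem.List.dedup xs).map (fun a => (a, (PySem.List.count xs a : Int))) := by
    simpa using PySem.Dict.items_foldl_insert_fresh (PySem.List.dedup xs) (fun a => a)
      (fun a => (PySem.List.count xs a : Int)) PySem.Dict.empty
      (fun a _ => PySem.Dict.contains_empty a)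
      (by simpa using PySem.List.nodup_dedup xs)
  rw [hA, PySem.Dict.items_counter, hB, PySem.List.dedup_eq_ofList]
  simp [PySem.List.count_eq]
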